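-- pv_equiv track=rewrite | github.com/wojciechGaudnik/CodeWars | Python/kyu7CleanUpAfterYourDog.py | crap
-- ===== SOURCE A (Python) =====
-- def crap(garden, bags, cap):
--     space = bags * cap
--     for line in garden:
--         for one in line:
--             if one == '@':
--                 space -= 1
--             if one == 'D':
--                 return "Dog!!"
--     return "Clean" if space >= 0 else "Cr@p"
-- ===== SOURCE B (Python) =====
-- def crap(garden, bags, cap):
--     if any(one == 'D' for line in garden for one in line):
--         return "Dog!!"
--     total = sum(line.count('@') for line in garden)
--     return "Clean" if total <= bags * cap else "Cr@p"
-- ===== Notes on version B (the rewrite author's own statement) =====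
-- stated objective: simpler
-- what changed: Replaces the single interleaved traversal with mutable space and early return by two separate passes: an any() dog check, then a sum of per-line counts compared against bags*cap.
import Mathlib
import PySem

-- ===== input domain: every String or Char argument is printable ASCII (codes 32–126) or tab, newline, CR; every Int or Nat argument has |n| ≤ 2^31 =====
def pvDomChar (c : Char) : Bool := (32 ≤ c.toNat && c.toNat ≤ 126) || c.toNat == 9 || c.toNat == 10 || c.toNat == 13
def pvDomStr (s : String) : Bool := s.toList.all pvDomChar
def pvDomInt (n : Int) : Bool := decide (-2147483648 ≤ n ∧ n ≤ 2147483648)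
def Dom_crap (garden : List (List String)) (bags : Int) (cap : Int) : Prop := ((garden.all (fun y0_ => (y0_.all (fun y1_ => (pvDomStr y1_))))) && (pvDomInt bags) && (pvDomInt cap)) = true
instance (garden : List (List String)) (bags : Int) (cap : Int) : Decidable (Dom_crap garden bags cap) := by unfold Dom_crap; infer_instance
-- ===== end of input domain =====

-- B splits A's single interleaved early-return traversal into two passes: a dog check, then a poop count compared with bags*cap.


-- ===== PORT A =====
-- inner loop over one line: returns none on early "Dog!!" return, otherwise the updated space
def crapLine (line : List String) (space : Int) : Option Int :=
  match line with
  | [] => some space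
  | one :: rest =>
    let space' := if one == "@" then space - 1 else space
    if one == "D" then none else crapLine rest space'

-- outer loop over the garden
def crapGarden (garden : List (List String)) (space : Int) : Option Int :=
  match garden with
  | [] => some space
  | line :: rest =>
    match crapLine line space with
    | none => none
    | some s => crapGarden rest s

def crap (garden : List (List String)) (bags : Int) (cap : Int) : String :=
  match crapGarden garden (bags * cap) with
  | none => "Dog!!"
  | some space => if space ≥ 0 then "Clean" else "Cr@p"

-- ===== PORT B =====
def crap_alt (garden : List (List String)) (bags : Int) (cap : Int) : String :=
  if garden.any (fun line => line.any (fun one => one == "D")) then "Dog!!"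
  else
    let total : Int := (garden.map (fun line => (PySem.List.count line "@" : Int))).sum
    if total ≤ bags * cap then "Clean" else "Cr@p"

-- ===== PRECONDITION & SPEC =====
def Spec_crap (garden : List (List String)) (bags : Int) (cap : Int) (out : String) : Prop := out = crap_alt garden bags cap
instance (garden : List (List String)) (bags : Int) (cap : Int) (out : String) : Decidable (Spec_crap garden bags cap out) := by unfold Spec_crap; infer_instance

-- ===== CLAIM (what is proved, stated in full; the proofs are below) =====
def Claim_equal_crap : Prop := ∀ (garden : List (List String)) (bags : Int) (cap : Int), Dom_crap garden bags cap → Spec_crap garden bags cap (crap garden bags cap)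

-- ===== LEMMAS AND PROOFS =====
theorem crapLine_char (line : List String) (space : Int) :
    crapLine line space =
      if line.any (fun one => one == "D") then none
      else some (space - (line.count "@" : Int)) := by
  induction line generalizing space with
  | nil => simp [crapLine]
  | cons one rest ih =>
    simp only [crapLine, List.any_cons, List.count_cons]
    by_cases hD : one == "D"
    · simp [hD]
    · by_cases hA : one == "@"
      · simp [hD, hA, ih]
        split
        · rfl
        · congr 1
          ring
      · simp [hD, hA, ih]

theorem crapGarden_char (garden : List (List String)) (space : Int) :
    crapGarden garden space =
      if garden.any (fun line => line.any (fun one => one == "D")) then none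
      else some (space - (garden.map (fun line => (line.count "@" : Int))).sum) := by
  induction garden generalizing space with
  | nil => simp [crapGarden]
  | cons line rest ih =>
    simp only [crapGarden, crapLine_char, List.any_cons, List.map_cons, List.sum_cons]
    by_cases hD : line.any (fun one => one == "D")
    · simp [hD]
    · simp only [hD, Bool.false_eq_true, if_false, Bool.false_or, ih]
      split
      · rfl
      · congr 1
        ring

-- ===== VERDICT (by name: the statement is the Claim_ definition above) =====
theorem crap_spec : Claim_equal_crap := by
  intro garden bags cap _
  unfold Spec_crap crap crap_alt
  rw [crapGarden_char]
  by_cases hD : garden.any (fun line => line.any (fun one => one == "D"))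
  · simp [hD]
  · simp only [hD, Bool.false_eq_true, if_false, PySem.List.count_eq]
    split <;> split <;> first | rfl | (exfalso; omega)
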